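-- pv_equiv track=rewrite | github.com/peter-als/sniffster | run-tests.py | select_tests_by_prefix
-- ===== SOURCE A (Python) =====
-- def select_tests_by_prefix(discovered: list[str], prefixes: list[str]) -> list[str]:
--     selected: list[str] = []
--     seen: set[str] = set()
--
--     for prefix in prefixes:
--         matches = [name for name in discovered if name.startswith(prefix)]
--         if not matches:
--             raise ValueError(prefix)
--         for name in matches:
--             if name not in seen:
--                 selected.append(name)
--                 seen.add(name)
--
--     return selected
-- ===== SOURCE B (Python) =====
-- def select_tests_by_prefix(discovered: list[str], prefixes: list[str]) -> list[str]:
--     for prefix in prefixes: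
--         if not any(name.startswith(prefix) for name in discovered):
--             raise ValueError(prefix)
--     uniq = list(dict.fromkeys(discovered))
--     keyed = []
--     for pos, name in enumerate(uniq):
--         j = next((j for j, prefix in enumerate(prefixes) if name.startswith(prefix)), None)
--         if j is not None:
--             keyed.append(((j, pos), name))
--     keyed.sort(key=lambda item: item[0])
--     return [name for _, name in keyed]
-- ===== Notes on version B (the rewrite author's own statement) =====
-- stated objective: faster
-- what changed: A rescans the whole discovered list once per prefix and dedups incrementally with a seen-set; B dedups discovered once, tags each distinct name with (index of its first matching prefix, its position) in a single pass, and produces the output by one stable sort on that key, so duplicate names and already-selected names are never rescanned.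
-- outside the precondition, e.g. on select_tests_by_prefix(['alpha'], ['x']): A raises ValueError, B raises ValueError
import Mathlib
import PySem

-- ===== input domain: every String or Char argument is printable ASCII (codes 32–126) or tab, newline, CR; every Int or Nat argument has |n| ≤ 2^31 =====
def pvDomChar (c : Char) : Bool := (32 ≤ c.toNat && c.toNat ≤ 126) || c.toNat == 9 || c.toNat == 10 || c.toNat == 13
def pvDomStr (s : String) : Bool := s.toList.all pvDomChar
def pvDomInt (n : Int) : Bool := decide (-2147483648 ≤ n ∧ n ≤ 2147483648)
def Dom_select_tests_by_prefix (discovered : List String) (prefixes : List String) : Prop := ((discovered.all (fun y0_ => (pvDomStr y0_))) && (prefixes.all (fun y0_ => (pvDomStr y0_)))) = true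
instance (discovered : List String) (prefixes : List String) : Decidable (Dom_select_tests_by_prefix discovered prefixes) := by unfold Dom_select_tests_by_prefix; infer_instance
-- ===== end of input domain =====

-- B replaces A's per-prefix rescans of `discovered` with one dedup pass that keys each distinct
-- name by (first matching prefix index, first-occurrence position) and one stable sort; the
-- timing run measured B faster on the generated inputs.

-- ===== PORT A =====
def select_tests_by_prefix (discovered : List String) (prefixes : List String) : List String :=
  (prefixes.foldl
    (fun (st : List String × PySem.Set String) pre =>
      -- matches = [name for name in discovered if name.startswith(prefix)]
      -- 'if not matches: raise ValueError(prefix)' — Pre_ excludes that case; the port continues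
      (discovered.filter (fun name => PySem.Str.startswith name pre)).foldl
        (fun st2 name =>
          if PySem.Set.contains st2.2 name then st2
          else (st2.1 ++ [name], PySem.Set.add st2.2 name))
        st)
    ([], PySem.Set.empty)).1

-- ===== PORT B =====
def select_tests_by_prefix_alt (discovered : List String) (prefixes : List String) : List String :=
  -- Source B's first loop only raises ValueError (excluded by Pre_); it computes nothing
  let uniq := PySem.List.dedup discovered
  let keyed := (PySem.List.enumerate uniq).filterMap
    (fun pn =>
      match (PySem.List.enumerate prefixes).find? (fun jp => PySem.Str.startswith pn.2 jp.2) with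
      | some jp => some ((jp.1, pn.1), pn.2)
      | none => none)
  (PySem.List.sorted2 keyed (fun item => item.1.1) (fun item => item.1.2)).map (fun item => item.2)

-- ===== PRECONDITION & SPEC =====
-- Pre_ excludes exactly the inputs where some prefix matches no discovered name: there Python A
-- (and Python B) raise ValueError.
def Pre_select_tests_by_prefix (discovered : List String) (prefixes : List String) : Prop :=
  ∀ p ∈ prefixes, ∃ n ∈ discovered, PySem.Str.startswith n p = true
instance (discovered : List String) (prefixes : List String) : Decidable (Pre_select_tests_by_prefix discovered prefixes) := by unfold Pre_select_tests_by_prefix; infer_instance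

def pvWitness_select_tests_by_prefix : List String × List String := (["test_a", "util_b"], ["test", "util"])

def Spec_select_tests_by_prefix (discovered : List String) (prefixes : List String) (out : List String) : Prop := out = select_tests_by_prefix_alt discovered prefixes
instance (discovered : List String) (prefixes : List String) (out : List String) : Decidable (Spec_select_tests_by_prefix discovered prefixes out) := by unfold Spec_select_tests_by_prefix; infer_instance

-- ===== CLAIM (what is proved, stated in full; the proofs are below) =====
def Claim_equal_select_tests_by_prefix : Prop := ∀ (discovered : List String) (prefixes : List String), Dom_select_tests_by_prefix discovered prefixes → Pre_select_tests_by_prefix discovered prefixes → Spec_select_tests_by_prefix discovered prefixes (select_tests_by_prefix discovered prefixes)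

-- ===== LEMMAS AND PROOFS =====

-- first matching prefix index (0 junk value when no prefix matches; such names never occur in either output)
def pvFirstJ (prefixes : List String) (n : String) : Int :=
  match (PySem.List.enumerate prefixes).find? (fun jp => PySem.Str.startswith n jp.2) with
  | some jp => jp.1
  | none => 0

-- closed form of A's loop: for each remaining prefix, the not-yet-seen distinct matching names in order
def pvGo (uniq done ps : List String) : List String :=
  match ps with
  | [] => []
  | p :: rest =>
    uniq.filter (fun n => PySem.Str.startswith n p && !(done.any (fun q => PySem.Str.startswith n q)))
      ++ pvGo uniq (done ++ [p]) rest

theorem pv_contains_iff (s : PySem.Set String) (n : String) :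
    PySem.Set.contains s n = true ↔ n ∈ s := by
  simp [PySem.Set.contains]


theorem pv_contains_add (s : PySem.Set String) (x n : String) :
    PySem.Set.contains (PySem.Set.add s x) n = (PySem.Set.contains s n || n == x) := by
  rw [Bool.eq_iff_iff]
  simp [PySem.Set.mem_add, beq_iff_eq]

theorem pv_contains_update (s : PySem.Set String) (xs : List String) (n : String) :
    PySem.Set.contains (PySem.Set.update s xs) n = (PySem.Set.contains s n || xs.contains n) := by
  rw [Bool.eq_iff_iff]
  simp [PySem.Set.mem_update]

theorem pv_discard_filter (p : String → Bool) (l : List String) (x : String) :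
    PySem.Set.discard (l.filter p) x = (PySem.Set.discard l x).filter p := by
  simp only [PySem.Set.discard, List.filter_filter]
  congr 1
  funext y
  exact Bool.and_comm _ _

theorem pv_inner (xs : List String) : ∀ (st : List String × PySem.Set String),
    xs.foldl
      (fun st2 name =>
        if PySem.Set.contains st2.2 name then st2
        else (st2.1 ++ [name], PySem.Set.add st2.2 name)) st
    = (st.1 ++ (PySem.List.dedup xs).filter (fun n => !PySem.Set.contains st.2 n),
       PySem.Set.update st.2 xs) := by
  intro st
  induction xs generalizing st with
  | nil => simp [PySem.Set.update]
  | cons x xs ih =>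
    rw [List.foldl_cons]
    by_cases hx : PySem.Set.contains st.2 x = true
    · have hmx : x ∈ st.2 := by simpa [PySem.Set.contains] using hx
      simp only [hx, if_true]
      rw [ih st]
      have hset : PySem.Set.update st.2 xs = PySem.Set.update st.2 (x :: xs) := by
        rw [PySem.Set.update_cons, PySem.Set.add_of_mem hmx]
      have hlist : (PySem.List.dedup xs).filter (fun n => !PySem.Set.contains st.2 n)
          = (PySem.List.dedup (x :: xs)).filter (fun n => !PySem.Set.contains st.2 n) := by
        rw [show PySem.List.dedup (x :: xs) = x :: PySem.Set.discard (PySem.List.dedup xs) x from by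
              simpa using PySem.Set.ofList_cons x xs]
        rw [List.filter_cons_of_neg (by simp [hmx])]
        simp only [PySem.Set.discard, List.filter_filter]
        apply List.filter_congr
        intro y _
        by_cases hyx : y = x
        · subst hyx; simp [hmx]
        · simp [hyx]
      rw [hset, hlist]
    · simp only [hx, if_false, Bool.false_eq_true]
      rw [ih ((st.1 ++ [x], PySem.Set.add st.2 x))]
      have hxmem : x ∉ st.2 := fun hm => hx ((pv_contains_iff st.2 x).2 hm)
      rw [Prod.ext_iff]
      refine ⟨?_, ?_⟩
      · show st.1 ++ [x] ++ _ = st.1 ++ _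
        rw [show PySem.List.dedup (x :: xs) = x :: PySem.Set.discard (PySem.List.dedup xs) x from by
              simpa using PySem.Set.ofList_cons x xs]
        rw [List.filter_cons_of_pos (by simp [hxmem])]
        rw [List.append_assoc, List.singleton_append]
        congr 2
        simp only [PySem.Set.discard, List.filter_filter, pv_contains_add, Bool.not_or]
      · show PySem.Set.update (PySem.Set.add st.2 x) xs = PySem.Set.update st.2 (x :: xs)
        rw [PySem.Set.update_cons]

theorem pv_dedup_filter (p : String → Bool) (xs : List String) :
    PySem.List.dedup (xs.filter p) = (PySem.List.dedup xs).filter p := by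
  induction xs with
  | nil => simp
  | cons x xs ih =>
    by_cases hp : p x
    · rw [List.filter_cons_of_pos hp]
      rw [show PySem.List.dedup (x :: List.filter p xs) = x :: PySem.Set.discard (PySem.List.dedup (List.filter p xs)) x from by
            simpa using PySem.Set.ofList_cons x (List.filter p xs)]
      rw [show PySem.List.dedup (x :: xs) = x :: PySem.Set.discard (PySem.List.dedup xs) x from by
            simpa using PySem.Set.ofList_cons x xs]
      rw [List.filter_cons_of_pos hp, ih, pv_discard_filter]
    · rw [List.filter_cons_of_neg hp]
      rw [show PySem.List.dedup (x :: xs) = x :: PySem.Set.discard (PySem.List.dedup xs) x from by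
            simpa using PySem.Set.ofList_cons x xs]
      rw [List.filter_cons_of_neg hp, ih]
      simp only [PySem.Set.discard, List.filter_filter]
      apply List.filter_congr
      intro y _
      by_cases hyx : y = x
      · subst hyx; simp [hp]
      · simp [hyx]

theorem pv_outer (discovered : List String) : ∀ (ps done : List String)
    (st : List String × PySem.Set String),
    (∀ n ∈ discovered, PySem.Set.contains st.2 n = done.any (fun q => PySem.Str.startswith n q)) →
    (ps.foldl
      (fun (st : List String × PySem.Set String) pre =>
        (discovered.filter (fun name => PySem.Str.startswith name pre)).foldl
          (fun st2 name =>
            if PySem.Set.contains st2.2 name then st2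
            else (st2.1 ++ [name], PySem.Set.add st2.2 name))
          st) st).1
    = st.1 ++ pvGo (PySem.List.dedup discovered) done ps := by
  intro ps
  induction ps with
  | nil => intro done st h; simp [pvGo]
  | cons p rest ih =>
    intro done st h
    rw [List.foldl_cons]
    rw [show pvGo (PySem.List.dedup discovered) done (p :: rest)
          = (PySem.List.dedup discovered).filter
              (fun n => PySem.Str.startswith n p && !(done.any fun q => PySem.Str.startswith n q))
            ++ pvGo (PySem.List.dedup discovered) (done ++ [p]) rest from rfl]
    rw [pv_inner]
    rw [ih (done ++ [p]) _ ?_]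
    · dsimp only
      rw [List.append_assoc]
      congr 1
      rw [pv_dedup_filter, List.filter_filter]
      congr 1
      apply List.filter_congr
      intro n hn
      have hnd : n ∈ discovered := (PySem.List.mem_dedup ..).1 hn
      rw [h n hnd]
      exact Bool.and_comm _ _
    · intro n hn
      rw [pv_contains_update, h n hn]
      rw [Bool.eq_iff_iff]
      simp only [Bool.or_eq_true, List.any_eq_true, List.any_append, List.contains_iff_mem,
        List.mem_filter, List.any_cons, List.any_nil, Bool.or_false]
      constructor
      · rintro (h1 | h2)
        · exact Or.inl h1
        · exact Or.inr h2.2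
      · rintro (h1 | h2)
        · exact Or.inl h1
        · exact Or.inr ⟨hn, h2⟩

theorem pvGo_mem (uniq : List String) : ∀ (ps done : List String) (x : String),
    x ∈ pvGo uniq done ps ↔
      x ∈ uniq ∧ (∃ p ∈ ps, PySem.Str.startswith x p = true) ∧
        (∀ q ∈ done, PySem.Str.startswith x q = false) := by
  intro ps
  induction ps with
  | nil => intro done x; simp [pvGo]
  | cons p rest ih =>
    intro done x
    rw [show pvGo uniq done (p :: rest)
          = uniq.filter (fun n => PySem.Str.startswith n p && !(done.any fun q => PySem.Str.startswith n q))
            ++ pvGo uniq (done ++ [p]) rest from rfl]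
    rw [List.mem_append, List.mem_filter, ih (done ++ [p]) x]
    simp only [Bool.and_eq_true, Bool.not_eq_true', List.any_eq_false, List.mem_append,
      List.mem_cons, Bool.not_eq_true]
    constructor
    · rintro (⟨hu, hp, hd⟩ | ⟨hu, ⟨q, hq, hsw⟩, hd⟩)
      · exact ⟨hu, ⟨p, Or.inl rfl, hp⟩, hd⟩
      · exact ⟨hu, ⟨q, Or.inr hq, hsw⟩, fun q' hq' => hd q' (Or.inl hq')⟩
    · rintro ⟨hu, ⟨q, hq | hq, hsw⟩, hd⟩
      · subst hq
        exact Or.inl ⟨hu, hsw, hd⟩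
      · by_cases hp : PySem.Str.startswith x p = true
        · exact Or.inl ⟨hu, hp, hd⟩
        · refine Or.inr ⟨hu, ⟨q, hq, hsw⟩, ?_⟩
          rintro q' (hq' | hq' | hq')
          · exact hd q' hq'
          · subst hq'; exact Bool.eq_false_iff.2 hp
          · exact absurd hq' List.not_mem_nil

theorem pv_find_spec (n : String) : ∀ (l1 : List String) (p : String) (l2 : List String) (s : Int),
    (∀ q ∈ l1, PySem.Str.startswith n q = false) → PySem.Str.startswith n p = true →
    (PySem.List.enumerate (l1 ++ p :: l2) s).find? (fun jp => PySem.Str.startswith n jp.2)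
      = some (s + l1.length, p) := by
  intro l1
  induction l1 with
  | nil =>
    intro p l2 s _ hp
    rw [List.nil_append, PySem.List.enumerate_cons, List.find?_cons_of_pos (by simpa using hp)]
    simp
  | cons q l1 ih =>
    intro p l2 s hnone hp
    rw [List.cons_append, PySem.List.enumerate_cons,
      List.find?_cons_of_neg (by simpa using hnone q (List.mem_cons_self ..))]
    rw [ih p l2 (s + 1) (fun r hr => hnone r (List.mem_cons_of_mem _ hr)) hp]
    congr 1
    rw [Prod.mk.injEq]
    refine ⟨?_, rfl⟩
    simp only [List.length_cons]
    push_cast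
    omega

theorem pvFirstJ_eq (prefixes done : List String) (p : String) (rest : List String)
    (h : done ++ p :: rest = prefixes) (n : String)
    (hnone : ∀ q ∈ done, PySem.Str.startswith n q = false)
    (hp : PySem.Str.startswith n p = true) : pvFirstJ prefixes n = done.length := by
  unfold pvFirstJ
  rw [← h, pv_find_spec n done p rest 0 hnone hp]
  simp

theorem pvFirstJ_ge (prefixes : List String) : ∀ (ps done : List String) (n : String),
    done ++ ps = prefixes → (∀ q ∈ done, PySem.Str.startswith n q = false) →
    (∃ p ∈ ps, PySem.Str.startswith n p = true) →
    (done.length : Int) ≤ pvFirstJ prefixes n := by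
  intro ps
  induction ps with
  | nil => rintro done n _ _ ⟨p, hp, _⟩; exact absurd hp (List.not_mem_nil)
  | cons p rest ih =>
    rintro done n h hnone ⟨q, hq, hsw⟩
    by_cases hp : PySem.Str.startswith n p = true
    · exact le_of_eq (pvFirstJ_eq prefixes done p rest h n hnone hp).symm
    · have hq' : q ∈ rest := by
        rcases List.mem_cons.1 hq with hq1 | hq1
        · subst hq1; exact absurd hsw hp
        · exact hq1
      have h' : (done ++ [p]) ++ rest = prefixes := by
        rw [List.append_assoc, List.singleton_append]; exact h
      have hnone' : ∀ r ∈ done ++ [p], PySem.Str.startswith n r = false := by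
        intro r hr
        rcases List.mem_append.1 hr with hr1 | hr1
        · exact hnone r hr1
        · rw [List.mem_singleton.1 hr1]; exact Bool.eq_false_iff.2 hp
      have := ih (done ++ [p]) n h' hnone' ⟨q, hq', hsw⟩
      simp only [List.length_append, List.length_singleton] at this
      omega

theorem pv_pairwise_idxOf (uniq : List String) (h : uniq.Nodup) :
    uniq.Pairwise (fun a b => List.idxOf a uniq < List.idxOf b uniq) := by
  rw [List.pairwise_iff_getElem]
  intro i j hi hj hij
  rw [List.Nodup.idxOf_getElem h i hi, List.Nodup.idxOf_getElem h j hj]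
  exact hij

theorem pvGo_pairwise (uniq prefixes : List String) (hu : uniq.Nodup) :
    ∀ (ps done : List String), done ++ ps = prefixes →
    (pvGo uniq done ps).Pairwise (fun a b =>
      toLex (pvFirstJ prefixes a, (List.idxOf a uniq : Int))
        < toLex (pvFirstJ prefixes b, (List.idxOf b uniq : Int))) := by
  intro ps
  induction ps with
  | nil => intro done _; exact List.Pairwise.nil
  | cons p rest ih =>
    intro done h
    rw [show pvGo uniq done (p :: rest)
          = uniq.filter (fun n => PySem.Str.startswith n p && !(done.any fun q => PySem.Str.startswith n q))
            ++ pvGo uniq (done ++ [p]) rest from rfl]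
    have h' : (done ++ [p]) ++ rest = prefixes := by
      rw [List.append_assoc, List.singleton_append]; exact h
    rw [List.pairwise_append]
    refine ⟨?_, ih (done ++ [p]) h', ?_⟩
    · have hbase := List.Pairwise.filter
        (fun n => PySem.Str.startswith n p && !(done.any fun q => PySem.Str.startswith n q))
        (pv_pairwise_idxOf uniq hu)
      refine List.Pairwise.imp_of_mem ?_ hbase
      intro a b ha hb hab
      have haf := (List.mem_filter.1 ha).2
      have hbf := (List.mem_filter.1 hb).2
      simp only [Bool.and_eq_true, Bool.not_eq_true', List.any_eq_false] at haf hbf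
      have hafq : ∀ q ∈ done, PySem.Str.startswith a q = false :=
        fun q hq => Bool.eq_false_iff.2 (haf.2 q hq)
      have hbfq : ∀ q ∈ done, PySem.Str.startswith b q = false :=
        fun q hq => Bool.eq_false_iff.2 (hbf.2 q hq)
      rw [Prod.Lex.toLex_lt_toLex]
      right
      dsimp only
      constructor
      · rw [pvFirstJ_eq prefixes done p rest h a hafq haf.1,
          pvFirstJ_eq prefixes done p rest h b hbfq hbf.1]
      · exact_mod_cast hab
    · intro a ha b hb
      have haf := (List.mem_filter.1 ha).2
      simp only [Bool.and_eq_true, Bool.not_eq_true', List.any_eq_false] at haf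
      have hafq : ∀ q ∈ done, PySem.Str.startswith a q = false :=
        fun q hq => Bool.eq_false_iff.2 (haf.2 q hq)
      have hja : pvFirstJ prefixes a = done.length :=
        pvFirstJ_eq prefixes done p rest h a hafq haf.1
      have hbm := (pvGo_mem uniq rest (done ++ [p]) b).1 hb
      have hjb : ((done ++ [p]).length : Int) ≤ pvFirstJ prefixes b :=
        pvFirstJ_ge prefixes rest (done ++ [p]) b h' hbm.2.2 hbm.2.1
      simp only [List.length_append, List.length_singleton] at hjb
      rw [Prod.Lex.toLex_lt_toLex]
      left
      dsimp only
      rw [hja]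
      omega

theorem pv_sorted2_lex (xs : List ((Int × Int) × String)) :
    PySem.List.sorted2 xs (fun item => item.1.1) (fun item => item.1.2)
      = PySem.List.sorted xs (fun item => toLex item.1) := by
  have hfun : (fun (a b : (Int × Int) × String) =>
      decide (a.1.1 < b.1.1) || (!decide (b.1.1 < a.1.1) && decide (a.1.2 < b.1.2)))
      = (fun (a b : (Int × Int) × String) => decide (toLex a.1 < toLex b.1)) := by
    funext a b
    rw [Bool.eq_iff_iff]
    simp only [Bool.or_eq_true, Bool.and_eq_true, Bool.not_eq_true', decide_eq_true_eq,
      decide_eq_false_iff_not, Prod.Lex.toLex_lt_toLex]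
    omega
  show xs.foldl (fun acc x => PySem.List.insertBy (fun a b =>
      decide (a.1.1 < b.1.1) || (!decide (b.1.1 < a.1.1) && decide (a.1.2 < b.1.2))) x acc) []
    = xs.foldl (fun acc x => PySem.List.insertBy (fun a b => decide (toLex a.1 < toLex b.1)) x acc) []
  rw [hfun]

theorem pv_main (discovered prefixes : List String) :
    select_tests_by_prefix discovered prefixes = select_tests_by_prefix_alt discovered prefixes := by
  set uniq := PySem.List.dedup discovered with huniq
  have hu : uniq.Nodup := by rw [huniq]; simp only [PySem.List.dedup_eq_ofList]; exact PySem.Set.nodup_ofList discovered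
  set f : Int × String → Option ((Int × Int) × String) := (fun pn =>
      match (PySem.List.enumerate prefixes).find? (fun jp => PySem.Str.startswith pn.2 jp.2) with
      | some jp => some ((jp.1, pn.1), pn.2)
      | none => none) with hf
  set keyed := (PySem.List.enumerate uniq).filterMap f with hkeyed
  set tag : String → (Int × Int) × String :=
    (fun n => ((pvFirstJ prefixes n, (List.idxOf n uniq : Int)), n)) with htag
  set ys := (pvGo uniq [] prefixes).map tag with hys
  -- A's side: the closed form
  have hA : select_tests_by_prefix discovered prefixes = pvGo uniq [] prefixes := by
    unfold select_tests_by_prefix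
    rw [pv_outer discovered prefixes [] ([], PySem.Set.empty)
      (by intro n _; simp [PySem.Set.contains, PySem.Set.empty])]
    simp [huniq]
  -- pairwise facts
  have hgopw := pvGo_pairwise uniq prefixes hu prefixes [] rfl
  have hyspw : ys.Pairwise (fun a b => toLex a.1 < toLex b.1) := by
    rw [hys]
    exact List.Pairwise.map tag (fun a b hab => hab) hgopw
  have hysnd : ys.Nodup :=
    hyspw.imp (fun {a b} hab heq => absurd (heq ▸ hab) (lt_irrefl _))
  have hkpw : keyed.Pairwise (fun a b => a.1.2 < b.1.2) := by
    rw [hkeyed]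
    rw [List.pairwise_filterMap]
    refine (PySem.List.pairwise_lt_enumerate uniq 0).imp ?_
    intro pn pn' hlt b hb b' hb'
    have h1 : b.1.2 = pn.1 := by
      rcases hfind : (PySem.List.enumerate prefixes).find? (fun jp => PySem.Str.startswith pn.2 jp.2) with _ | jp
      · rw [hf] at hb; dsimp only at hb; rw [hfind] at hb; cases hb
      · rw [hf] at hb; dsimp only at hb; rw [hfind] at hb
        cases hb; rfl
    have h2 : b'.1.2 = pn'.1 := by
      rcases hfind : (PySem.List.enumerate prefixes).find? (fun jp => PySem.Str.startswith pn'.2 jp.2) with _ | jp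
      · rw [hf] at hb'; dsimp only at hb'; rw [hfind] at hb'; cases hb'
      · rw [hf] at hb'; dsimp only at hb'; rw [hfind] at hb'
        cases hb'; rfl
    rw [h1, h2]; exact hlt
  have hknd : keyed.Nodup :=
    hkpw.imp (fun {a b} hab heq => absurd (heq ▸ hab) (lt_irrefl _))
  -- same members
  have hmem : ∀ item, item ∈ ys ↔ item ∈ keyed := by
    intro item
    constructor
    · intro hit
      rw [hys] at hit
      rcases List.mem_map.1 hit with ⟨n, hgo, rfl⟩
      rcases (pvGo_mem uniq prefixes [] n).1 hgo with ⟨hnu, ⟨p, hpmem, hsw⟩, -⟩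
      rcases List.mem_iff_getElem.1 hnu with ⟨k, hk, rfl⟩
      rcases List.mem_iff_getElem.1 hpmem with ⟨j, hj, rfl⟩
      have hsome : ((PySem.List.enumerate prefixes).find?
          (fun jp => PySem.Str.startswith uniq[k] jp.2)).isSome := by
        rw [List.find?_isSome]
        exact ⟨((0 : Int) + j, prefixes[j]),
          (PySem.List.mem_enumerate_iff prefixes 0 _).2 ⟨j, hj, rfl⟩, by simpa using hsw⟩
      rcases Option.isSome_iff_exists.1 hsome with ⟨jp, hfind⟩
      rw [hkeyed]
      apply List.mem_filterMap.2
      refine ⟨((0 : Int) + k, uniq[k]), (PySem.List.mem_enumerate_iff uniq 0 _).2 ⟨k, hk, rfl⟩, ?_⟩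
      rw [hf]
      simp only [hfind]
      simp only [htag]
      have hJ : pvFirstJ prefixes uniq[k] = jp.1 := by
        unfold pvFirstJ; rw [hfind]
      have hidx : (List.idxOf uniq[k] uniq : Int) = (0 : Int) + k := by
        rw [List.Nodup.idxOf_getElem hu k hk]; simp
      rw [hJ, hidx]
    · intro hit
      rw [hkeyed] at hit
      rcases List.mem_filterMap.1 hit with ⟨pn, hpn, hfi⟩
      rcases (PySem.List.mem_enumerate_iff uniq 0 pn).1 hpn with ⟨k, hk, rfl⟩
      rcases hfind : (PySem.List.enumerate prefixes).find?
          (fun jp => PySem.Str.startswith uniq[k] jp.2) with _ | jp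
      · rw [hf] at hfi
        dsimp only at hfi
        rw [hfind] at hfi
        cases hfi
      · rw [hf] at hfi
        dsimp only at hfi
        rw [hfind] at hfi
        have hpred := List.find?_some hfind
        have hjmem := List.mem_of_find?_eq_some hfind
        rcases (PySem.List.mem_enumerate_iff prefixes 0 jp).1 hjmem with ⟨j, hj, rfl⟩
        have hgo : uniq[k] ∈ pvGo uniq [] prefixes := by
          apply (pvGo_mem uniq prefixes [] uniq[k]).2
          refine ⟨List.getElem_mem hk,
            ⟨prefixes[j], List.getElem_mem hj, by simp at hpred; exact hpred⟩, by simp⟩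
        rw [hys]
        apply List.mem_map.2
        refine ⟨uniq[k], hgo, ?_⟩
        simp only [htag]
        have hJ : pvFirstJ prefixes uniq[k] = ((0 : Int) + j, prefixes[j]).1 := by
          unfold pvFirstJ; rw [hfind]
        have hidx : (List.idxOf uniq[k] uniq : Int) = (0 : Int) + k := by
          rw [List.Nodup.idxOf_getElem hu k hk]; simp
        rw [hJ, hidx]
        exact Option.some.inj hfi
  have hperm : ys.Perm keyed := (List.perm_ext_iff_of_nodup hysnd hknd).2 hmem
  -- B's side
  have hB : select_tests_by_prefix_alt discovered prefixes
      = List.map (fun item => item.2)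
          (PySem.List.sorted2 keyed (fun item => item.1.1) (fun item => item.1.2)) := rfl
  rw [hA, hB, pv_sorted2_lex,
    PySem.List.sorted_eq_of_perm_of_pairwise_lt keyed ys (fun item => toLex item.1) hperm hyspw,
    hys, List.map_map]
  have hcomp : ((fun (item : (Int × Int) × String) => item.2) ∘ tag) = id := by
    funext n; simp [htag]
  rw [hcomp, List.map_id]

-- ===== VERDICT (by name: the statement is the Claim_ definition above) =====
theorem select_tests_by_prefix_spec : Claim_equal_select_tests_by_prefix := by
  intro discovered prefixes _ _
  exact pv_main discovered prefixes
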